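-- pv_equiv track=rewrite | github.com/vgdpro/sqlite-cdb-to-json | sqlite_cdb_to_json.py | card_setcard
-- ===== SOURCE A (Python) =====
-- def card_setcard(setcard_number, code):
--     number = str(hex(setcard_number)).removeprefix('0x')
--
--     while (len(number) % 4 > 0):
--         number = '0' + number
--
--     result = []
--     a = ' '
--
--     if (code == 20401007):
--         result.append('0090')
--
--     for character in number:
--         if (a == ' '): a = character
--         else: a += character
--         if (len(a) == 4):
--             if (a != "0000"):
--                 result.append(a)
--             a = ' '
--
--     if (len(result) == 0):
--          return ['-']
--
--     return result
-- ===== SOURCE B (Python) =====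
-- def card_setcard(setcard_number, code):
--     number = hex(setcard_number).removeprefix('0x')
--     s = '0' * (-len(number) % 4) + number
--     result = ['0090'] if code == 20401007 else []
--     while s:
--         if s[:4] != '0000':
--             result.append(s[:4])
--         s = s[4:]
--     return result or ['-']
-- ===== Notes on version B (the rewrite author's own statement) =====
-- stated objective: simpler
-- what changed: Replaces the prepend-one-zero while loop by a computed '0'*(-len%4) pad and the character-by-character sentinel accumulator by direct 4-character slicing, dropping '0000' groups as they are sliced.
import Mathlib
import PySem

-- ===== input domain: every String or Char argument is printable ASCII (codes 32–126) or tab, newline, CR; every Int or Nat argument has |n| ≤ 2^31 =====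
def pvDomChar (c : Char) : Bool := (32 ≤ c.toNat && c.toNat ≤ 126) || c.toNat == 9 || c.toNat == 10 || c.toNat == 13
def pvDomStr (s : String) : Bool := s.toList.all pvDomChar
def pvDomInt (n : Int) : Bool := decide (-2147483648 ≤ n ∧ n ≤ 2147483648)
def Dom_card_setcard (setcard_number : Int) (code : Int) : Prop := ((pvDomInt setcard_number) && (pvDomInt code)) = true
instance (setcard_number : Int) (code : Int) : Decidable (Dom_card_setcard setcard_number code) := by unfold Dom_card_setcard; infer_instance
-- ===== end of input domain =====

-- B replaces A's prepend-a-zero padding loop and character-by-character sentinel accumulator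
-- by a computed pad length and direct 4-character slicing (simpler decomposition, same cost).

-- shared helper: Python's hex(n).removeprefix('0x') (both Pythons call the builtin hex identically)
def hexDigit (n : Nat) : Char := if n < 10 then Char.ofNat (48 + n) else Char.ofNat (87 + n)

def natHexAux (n : Nat) (acc : List Char) : List Char :=
  if n = 0 then acc else natHexAux (n / 16) (hexDigit (n % 16) :: acc)
termination_by n
decreasing_by exact Nat.div_lt_self (by omega) (by omega)

def pyHexNoPrefix (n : Int) : List Char :=
  if n < 0 then '-' :: '0' :: 'x' :: natHexAux n.natAbs []
  else if n = 0 then ['0']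
  else natHexAux n.natAbs []

-- ===== PORT A =====
-- while (len(number) % 4 > 0): number = '0' + number
def padA (number : List Char) : List Char :=
  if number.length % 4 > 0 then padA ('0' :: number) else number
termination_by (4 - number.length % 4) % 4
decreasing_by simp only [List.length_cons]; omega

-- the for-loop over the characters, state = (result, a) with sentinel a = " "
def loopA : List Char → List String → List Char → List String
  | [], result, _ => result
  | ch :: rest, result, a =>
    let a1 := if a = [' '] then [ch] else a ++ [ch]
    if a1.length = 4 then
      loopA rest (if a1 ≠ ['0', '0', '0', '0'] then result ++ [String.ofList a1] else result) [' ']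
    else
      loopA rest result a1

def card_setcard (setcard_number : Int) (code : Int) : List String :=
  let number := padA (pyHexNoPrefix setcard_number)
  let result : List String := if code = 20401007 then ["0090"] else []
  let result := loopA number result [' ']
  if result.length = 0 then ["-"] else result

-- ===== PORT B =====
-- while s: if s[:4] != '0000': result.append(s[:4]); s = s[4:]
def chunkLoopB (s : List Char) (result : List String) : List String :=
  if s = [] then result
  else chunkLoopB (s.drop 4)
    (if s.take 4 ≠ ['0', '0', '0', '0'] then result ++ [String.ofList (s.take 4)] else result)
termination_by s.length
decreasing_by rename_i h; cases s with | nil => exact absurd rfl h | cons x xs => simp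

def card_setcard_alt (setcard_number : Int) (code : Int) : List String :=
  let number := pyHexNoPrefix setcard_number
  let s := List.replicate (PySem.Int.mod (-(number.length : Int)) 4).toNat '0' ++ number
  let result := chunkLoopB s (if code = 20401007 then ["0090"] else [])
  if result = [] then ["-"] else result

-- ===== PRECONDITION & SPEC =====
def Spec_card_setcard (setcard_number : Int) (code : Int) (out : List String) : Prop := out = card_setcard_alt setcard_number code
instance (setcard_number : Int) (code : Int) (out : List String) : Decidable (Spec_card_setcard setcard_number code out) := by unfold Spec_card_setcard; infer_instance

-- ===== CLAIM (what is proved, stated in full; the proofs are below) =====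
def Claim_equal_card_setcard : Prop := ∀ (setcard_number : Int) (code : Int), Dom_card_setcard setcard_number code → Spec_card_setcard setcard_number code (card_setcard setcard_number code)

-- ===== LEMMAS AND PROOFS =====

-- A's padding loop computes B's '0' * (-len % 4) pad
theorem padA_eq (l : List Char) :
    padA l = List.replicate ((4 - l.length % 4) % 4) '0' ++ l := by
  fun_induction padA l with
  | case1 l h ih =>
    rw [ih]
    have h4 : (4 - (l.length + 1) % 4) % 4 + 1 = (4 - l.length % 4) % 4 := by omega
    rw [← h4, List.replicate_succ' (n := (4 - (l.length + 1) % 4) % 4)]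
    simp [List.length_cons]
  | case2 l h => simp at h; simp [h]

theorem mod_pad (n : Nat) : (PySem.Int.mod (-(n : Int)) 4).toNat = (4 - n % 4) % 4 := by
  rw [PySem.Int.mod_eq_emod_of_pos (by norm_num)]
  omega

theorem hexDigit_ne_space (m : Nat) (h : m < 16) : hexDigit m ≠ ' ' := by
  interval_cases m <;> decide

theorem natHexAux_ne_space (n : Nat) (acc : List Char) :
    (∀ c ∈ acc, c ≠ ' ') → ∀ c ∈ natHexAux n acc, c ≠ ' ' := by
  fun_induction natHexAux n acc with
  | case1 acc => exact fun hacc => hacc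
  | case2 n acc h ih =>
    intro hacc
    refine ih ?_
    intro c hc
    rcases List.mem_cons.mp hc with hc | hc
    · subst hc; exact hexDigit_ne_space _ (Nat.mod_lt _ (by omega))
    · exact hacc c hc

theorem pyHex_ne_space (n : Int) : ∀ c ∈ pyHexNoPrefix n, c ≠ ' ' := by
  unfold pyHexNoPrefix
  split
  · intro c hc
    simp only [List.mem_cons] at hc
    rcases hc with rfl | rfl | rfl | hc
    · decide
    · decide
    · decide
    · exact natHexAux_ne_space _ [] (by simp) c hc
  · split
    · intro c hc; simp only [List.mem_cons, List.not_mem_nil, or_false] at hc; subst hc; decide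
    · exact natHexAux_ne_space _ [] (by simp)

-- the central lemma: A's sentinel loop equals B's 4-slice loop on space-free inputs of length 4*n
theorem loop_eq (n : Nat) : ∀ (s : List Char) (r : List String),
    s.length = 4 * n → (∀ c ∈ s, c ≠ ' ') → loopA s r [' '] = chunkLoopB s r := by
  induction n with
  | zero =>
    intro s r hl _
    have : s = [] := List.eq_nil_of_length_eq_zero (by omega)
    subst this
    rw [loopA, chunkLoopB]
    simp
  | succ k ih =>
    intro s r hl hsp
    match s, hl with
    | a :: b :: c :: d :: rest, hl =>
      have ha : a ≠ ' ' := hsp a (by simp)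
      have hb : b ≠ ' ' := hsp b (by simp)
      have hc : c ≠ ' ' := hsp c (by simp)
      have hd : d ≠ ' ' := hsp d (by simp)
      have h1 : loopA (a :: b :: c :: d :: rest) r [' ']
          = loopA rest (if [a, b, c, d] ≠ ['0', '0', '0', '0'] then r ++ [String.ofList [a, b, c, d]] else r) [' '] := by
        simp [loopA, ha]
      have h2 : chunkLoopB (a :: b :: c :: d :: rest) r
          = chunkLoopB rest (if [a, b, c, d] ≠ ['0', '0', '0', '0'] then r ++ [String.ofList [a, b, c, d]] else r) := by
        rw [chunkLoopB, if_neg (by simp : ¬ (a :: b :: c :: d :: rest = []))]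
        rfl
      rw [h1, h2]
      exact ih rest _ (by simp at hl ⊢; omega) (fun x hx => hsp x (by simp [hx]))

-- ===== VERDICT (by name: the statement is the Claim_ definition above) =====
theorem card_setcard_spec : Claim_equal_card_setcard := by
  intro m code _
  unfold Spec_card_setcard card_setcard card_setcard_alt
  dsimp only
  rw [padA_eq, mod_pad]
  set num := pyHexNoPrefix m with hnum
  set s := List.replicate ((4 - num.length % 4) % 4) '0' ++ num with hs
  have hlen : s.length % 4 = 0 := by
    simp [hs]; omega
  obtain ⟨n, hn⟩ : ∃ n, s.length = 4 * n := ⟨s.length / 4, by omega⟩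
  have hsp : ∀ c ∈ s, c ≠ ' ' := by
    intro c hcs
    rcases List.mem_append.mp hcs with h | h
    · have := List.eq_of_mem_replicate h; subst this; decide
    · exact pyHex_ne_space m c h
  rw [loop_eq n s _ hn hsp]
  have : (chunkLoopB s (if code = 20401007 then ["0090"] else [])).length = 0
      ↔ chunkLoopB s (if code = 20401007 then ["0090"] else []) = [] := List.length_eq_zero_iff
  split <;> split <;> simp_all
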